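-- pv_equiv track=rewrite | github.com/virat-dagar/PatternPrinter | backend/patterns.py | _left_triangle_hollow
-- ===== SOURCE A (Python) =====
-- def _left_triangle_hollow(symbol: str, size: int) -> list[str]:
--     rows = []
--     for row in range(size):
--         line = [" "] * (size - row - 1)
--         for col in range(row + 1):
--             line.append(symbol if row == size - 1 or col in (0, row) else " ")
--         rows.append("".join(line))
--     return rows
-- ===== SOURCE B (Python) =====
-- def _left_triangle_hollow(symbol: str, size: int) -> list[str]:
--     def build(row: int) -> str:
--         lead = " " * (size - row - 1)
--         if row == 0:
--             return lead + symbol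
--         if row == size - 1:
--             return lead + symbol * size
--         return lead + symbol + " " * (row - 1) + symbol
--     return [build(row) for row in range(size)]
-- ===== Notes on version B (the rewrite author's own statement) =====
-- stated objective: simpler
-- what changed: Replaced the per-cell inner loop with a closed-form per-row construction (lead spaces + first/bottom/interior string formula), building the list by comprehension.
import Mathlib
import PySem

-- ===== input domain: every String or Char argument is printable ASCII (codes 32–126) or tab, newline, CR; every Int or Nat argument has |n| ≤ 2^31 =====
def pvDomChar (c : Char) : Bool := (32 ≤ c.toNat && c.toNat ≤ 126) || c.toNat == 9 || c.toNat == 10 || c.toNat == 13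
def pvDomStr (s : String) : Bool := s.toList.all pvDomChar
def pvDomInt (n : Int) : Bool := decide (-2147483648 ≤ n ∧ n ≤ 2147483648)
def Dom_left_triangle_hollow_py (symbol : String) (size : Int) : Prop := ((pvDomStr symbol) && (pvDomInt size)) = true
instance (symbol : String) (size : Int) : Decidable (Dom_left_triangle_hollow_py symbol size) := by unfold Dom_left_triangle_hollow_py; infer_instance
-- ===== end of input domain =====

-- B replaces A's per-cell inner loop by a closed-form per-row construction (simpler decomposition, same cost).

-- ===== PORT A =====
def left_triangle_hollow_py (symbol : String) (size : Int) : List String :=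
  (PySem.List.pyRange 0 size).foldl (fun rows row =>
    let line0 := PySem.List.pyRepeat [" "] (size - row - 1)
    let line := (PySem.List.pyRange 0 (row + 1)).foldl
      (fun line col => line ++ [if row = size - 1 ∨ col = 0 ∨ col = row then symbol else " "]) line0
    rows ++ [PySem.Str.join "" line]) []

-- ===== PORT B =====
-- helper 'build' of Source B; Python str concatenation/repetition ported on code points (exact)
def pvBuildRow (symbol : List Char) (size row : Int) : List Char :=
  let lead := PySem.List.pyRepeat [' '] (size - row - 1)
  if row = 0 then lead ++ symbol
  else if row = size - 1 then lead ++ PySem.List.pyRepeat symbol size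
  else lead ++ symbol ++ PySem.List.pyRepeat [' '] (row - 1) ++ symbol

def left_triangle_hollow_py_alt (symbol : String) (size : Int) : List String :=
  (PySem.List.pyRange 0 size).map (fun row => String.ofList (pvBuildRow symbol.toList size row))

-- ===== PRECONDITION & SPEC =====
def Spec_left_triangle_hollow_py (symbol : String) (size : Int) (out : List String) : Prop := out = left_triangle_hollow_py_alt symbol size
instance (symbol : String) (size : Int) (out : List String) : Decidable (Spec_left_triangle_hollow_py symbol size out) := by unfold Spec_left_triangle_hollow_py; infer_instance

-- ===== CLAIM (what is proved, stated in full; the proofs are below) =====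
def Claim_equal_left_triangle_hollow_py : Prop := ∀ (symbol : String) (size : Int), Dom_left_triangle_hollow_py symbol size → Spec_left_triangle_hollow_py symbol size (left_triangle_hollow_py symbol size)

-- ===== LEMMAS AND PROOFS =====

theorem pv_join_nil_flatten (ls : List (List Char)) : PySem.Chars.join [] ls = ls.flatten := by
  induction ls with
  | nil => simp [PySem.Chars.join_nil]
  | cons p rest ih =>
    cases rest with
    | nil => simp [PySem.Chars.join_singleton]
    | cons q r => rw [PySem.Chars.join_cons_cons]; simp_all

theorem pv_pyRepeat_eq (l : List Char) (k : Nat) :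
    PySem.List.pyRepeat l (k : Int) = (List.replicate k l).flatten := by
  simp [PySem.List.pyRepeat]

theorem pv_row_eq (symbol : String) (size r : Int) (h0 : 0 ≤ r) (h1 : r < size) :
    PySem.Str.join "" ((PySem.List.pyRange 0 (r + 1)).foldl
        (fun line col => line ++ [if r = size - 1 ∨ col = 0 ∨ col = r then symbol else " "])
        (PySem.List.pyRepeat [" "] (size - r - 1)))
      = String.ofList (pvBuildRow symbol.toList size r) := by
  apply String.toList_injective
  rw [String.toList_ofList]
  rw [PySem.List.foldl_append_eq_flatMap (fun col => [if r = size - 1 ∨ col = 0 ∨ col = r then symbol else " "])]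
  rw [PySem.Str.toList_join]
  have he : ("" : String).toList = [] := rfl
  rw [he, pv_join_nil_flatten, ← List.map_eq_flatMap]
  simp only [List.map_append, List.flatten_append, List.map_map]
  have hlead : ((PySem.List.pyRepeat [" "] (size - r - 1)).map String.toList).flatten
      = PySem.List.pyRepeat [' '] (size - r - 1) := by
    rw [PySem.List.pyRepeat_singleton, PySem.List.pyRepeat_singleton]
    simp [List.map_replicate]
  rw [hlead]
  unfold pvBuildRow
  by_cases hb : r = size - 1
  · -- bottom row: every cell is the symbol
    have hmap : (PySem.List.pyRange 0 (r + 1)).map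
        ((String.toList ∘ fun col => if r = size - 1 ∨ col = 0 ∨ col = r then symbol else " "))
        = List.replicate (r + 1).toNat symbol.toList := by
      rw [List.map_congr_left (g := fun _ => symbol.toList) (by intro c _; simp [hb])]
      simp [List.map_const', PySem.List.length_pyRange_one]
    rw [hmap]
    by_cases hz : r = 0
    · subst hz
      have : size = 1 := by omega
      subst this
      simp
    · rw [if_neg hz, if_pos hb]
      have h2 : PySem.List.pyRepeat symbol.toList size = (List.replicate (r + 1).toNat symbol.toList).flatten := by
        have h3 : size = (((r + 1).toNat : Nat) : Int) := by omega
        rw [h3, pv_pyRepeat_eq]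
      rw [h2]
  · by_cases hz : r = 0
    · subst hz
      rw [if_pos rfl]
      have : PySem.List.pyRange 0 (0 + 1) = [0] := by
        rw [PySem.List.pyRange_one_cons (by omega), PySem.List.pyRange_one_eq_nil (by omega)]
      rw [this]
      simp
    · -- interior row: symbol, r-1 spaces, symbol
      rw [if_neg hz, if_neg hb]
      have hsplit : PySem.List.pyRange 0 (r + 1) = 0 :: (PySem.List.pyRange 1 r ++ [r]) := by
        rw [PySem.List.pyRange_one_cons (by omega)]
        norm_num
        rw [PySem.List.pyRange_one_succ_right (by omega)]
      rw [hsplit]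
      have hmid : (PySem.List.pyRange 1 r).map
          ((String.toList ∘ fun col => if r = size - 1 ∨ col = 0 ∨ col = r then symbol else " "))
          = List.replicate (r - 1).toNat [' '] := by
        rw [List.map_congr_left (g := fun _ => [' ']) ?_]
        · simp [List.map_const', PySem.List.length_pyRange_one]
        · intro c hc
          rw [PySem.List.mem_pyRange_one] at hc
          have : ¬ (r = size - 1 ∨ c = 0 ∨ c = r) := by omega
          simp [this]
      simp only [List.map_cons, List.map_append, List.flatten_cons, List.flatten_append, hmid]
      have : PySem.List.pyRepeat [' '] (r - 1) = (List.replicate (r - 1).toNat [' ']).flatten := by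
        have h : r - 1 = (((r - 1).toNat : Nat) : Int) := by omega
        rw [h, pv_pyRepeat_eq]
        simp
      rw [this]
      simp [hb, hz]

-- ===== VERDICT (by name: the statement is the Claim_ definition above) =====
theorem left_triangle_hollow_py_spec : Claim_equal_left_triangle_hollow_py := by
  intro symbol size _
  unfold Spec_left_triangle_hollow_py left_triangle_hollow_py left_triangle_hollow_py_alt
  rw [PySem.List.foldl_append_eq_flatMap (fun row => [PySem.Str.join "" ((PySem.List.pyRange 0 (row + 1)).foldl
      (fun line col => line ++ [if row = size - 1 ∨ col = 0 ∨ col = row then symbol else " "])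
      (PySem.List.pyRepeat [" "] (size - row - 1)))])]
  rw [← List.map_eq_flatMap]
  simp only [List.nil_append]
  apply List.map_congr_left
  intro r hr
  rw [PySem.List.mem_pyRange_one] at hr
  exact pv_row_eq symbol size r hr.1 hr.2
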